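-- pv_equiv track=rewrite | github.com/GMyhf/2025spring-cs201 | code/2048/8_auto_2048_expectimax_ab.py | calculate_smoothness
-- ===== SOURCE A (Python) =====
-- BOARD_SIZE = 4
--
-- def calculate_smoothness(board):
--     """计算平滑度：相邻单元格差值的总和（差值越小越好）"""
--     smooth = 0
--     for i in range(BOARD_SIZE):
--         for j in range(BOARD_SIZE - 1):
--             smooth -= abs(board[i][j] - board[i][j+1])
--     for j in range(BOARD_SIZE):
--         for i in range(BOARD_SIZE - 1):
--             smooth -= abs(board[i][j] - board[i+1][j])
--     return smooth
-- ===== SOURCE B (Python) =====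
-- BOARD_SIZE = 4
--
-- def calculate_smoothness(board):
--     """Smoothness by one recursive pass over the rows of the extracted 4x4 block:
--     each step charges a row's internal adjacent differences plus its interface to the next row."""
--     def row_cost(row):
--         if len(row) < 2:
--             return 0
--         return abs(row[0] - row[1]) + row_cost(row[1:])
--
--     def pair_cost(r1, r2):
--         if not r1 or not r2:
--             return 0
--         return abs(r1[0] - r2[0]) + pair_cost(r1[1:], r2[1:])
--
--     def go(rows):
--         if not rows:
--             return 0
--         if len(rows) == 1:
--             return row_cost(rows[0])
--         return row_cost(rows[0]) + pair_cost(rows[0], rows[1]) + go(rows[1:])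
--
--     grid = [[board[i][j] for j in range(BOARD_SIZE)] for i in range(BOARD_SIZE)]
--     return -go(grid)
-- ===== Notes on version B (the rewrite author's own statement) =====
-- stated objective: alternative
-- what changed: Replaces A's two staged index-driven nested scans (all horizontal pairs, then all vertical pairs) with a single structural recursion over the row list that interleaves each row's internal adjacency cost with its interface cost to the next row, negating once at the end.
import Mathlib
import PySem

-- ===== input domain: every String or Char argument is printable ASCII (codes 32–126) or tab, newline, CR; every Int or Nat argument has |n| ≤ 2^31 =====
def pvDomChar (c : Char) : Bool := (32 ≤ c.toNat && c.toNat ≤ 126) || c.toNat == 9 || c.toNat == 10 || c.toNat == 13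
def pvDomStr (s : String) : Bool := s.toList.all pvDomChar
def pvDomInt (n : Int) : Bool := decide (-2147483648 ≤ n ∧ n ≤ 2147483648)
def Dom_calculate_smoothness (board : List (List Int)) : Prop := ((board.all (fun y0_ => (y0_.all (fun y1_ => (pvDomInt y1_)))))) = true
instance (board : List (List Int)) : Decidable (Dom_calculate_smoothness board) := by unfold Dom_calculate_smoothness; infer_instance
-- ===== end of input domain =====

-- B replaces A's two staged index-driven nested scans with one structural recursion over the
-- row list interleaving each row's internal adjacency cost with its interface to the next row.

-- ===== PORT A =====
def calculate_smoothness (board : List (List Int)) : Int :=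
  let smooth : Int :=
    (PySem.List.pyRange 0 4 1).foldl (fun s i =>
      (PySem.List.pyRange 0 3 1).foldl (fun s j =>
        s - |PySem.List.pyGetD (PySem.List.pyGetD board i []) j 0
             - PySem.List.pyGetD (PySem.List.pyGetD board i []) (j + 1) 0|) s) 0
  (PySem.List.pyRange 0 4 1).foldl (fun s j =>
    (PySem.List.pyRange 0 3 1).foldl (fun s i =>
      s - |PySem.List.pyGetD (PySem.List.pyGetD board i []) j 0
           - PySem.List.pyGetD (PySem.List.pyGetD board (i + 1) []) j 0|) s) smooth

-- ===== PORT B =====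
def pvRowCost : List Int → Int
  | x :: y :: t => |x - y| + pvRowCost (y :: t)
  | _ => 0

def pvPairCost : List Int → List Int → Int
  | x :: xs, y :: ys => |x - y| + pvPairCost xs ys
  | _, _ => 0

def pvGo : List (List Int) → Int
  | [] => 0
  | [r] => pvRowCost r
  | r1 :: r2 :: rest => pvRowCost r1 + pvPairCost r1 r2 + pvGo (r2 :: rest)

def calculate_smoothness_alt (board : List (List Int)) : Int :=
  let grid := (PySem.List.pyRange 0 4 1).map (fun i =>
    (PySem.List.pyRange 0 4 1).map (fun j =>
      PySem.List.pyGetD (PySem.List.pyGetD board i []) j 0));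
  -(pvGo grid)

-- ===== PRECONDITION & SPEC =====
-- Pre_ excludes exactly the boards on which Python A raises IndexError: fewer than 4 rows, or one of the first 4 rows shorter than 4.
def Pre_calculate_smoothness (board : List (List Int)) : Prop :=
  4 ≤ board.length ∧ ∀ r ∈ board.take 4, 4 ≤ r.length
instance (board : List (List Int)) : Decidable (Pre_calculate_smoothness board) := by
  unfold Pre_calculate_smoothness; infer_instance
def pvWitness_calculate_smoothness : List (List Int) :=
  [[2, 4, 8, 16], [0, 2, 0, 2], [4, 4, 4, 4], [16, 8, 4, 2]]

def Spec_calculate_smoothness (board : List (List Int)) (out : Int) : Prop := out = calculate_smoothness_alt board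
instance (board : List (List Int)) (out : Int) : Decidable (Spec_calculate_smoothness board out) := by unfold Spec_calculate_smoothness; infer_instance

-- ===== CLAIM =====
def Claim_equal_calculate_smoothness : Prop := ∀ (board : List (List Int)), Dom_calculate_smoothness board → Pre_calculate_smoothness board → Spec_calculate_smoothness board (calculate_smoothness board)

-- ===== LEMMAS AND PROOFS =====

lemma pv_shape4 {α : Type} (l : List α) (h : 4 ≤ l.length) :
    ∃ a b c d t, l = a :: b :: c :: d :: t := by
  match l with
  | a :: b :: c :: d :: t => exact ⟨a, b, c, d, t, rfl⟩
  | [] | [_] | [_, _] | [_, _, _] => simp at h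

-- ===== VERDICT =====
theorem calculate_smoothness_spec : Claim_equal_calculate_smoothness := by
  intro board _ hpre
  obtain ⟨hlen, hrows⟩ := hpre
  obtain ⟨r0, r1, r2, r3, rt, rfl⟩ := pv_shape4 board hlen
  obtain ⟨a0, a1, a2, a3, t0, rfl⟩ := pv_shape4 r0 (hrows _ (by simp))
  obtain ⟨b0, b1, b2, b3, t1, rfl⟩ := pv_shape4 r1 (hrows _ (by simp))
  obtain ⟨c0, c1, c2, c3, t2, rfl⟩ := pv_shape4 r2 (hrows _ (by simp))
  obtain ⟨d0, d1, d2, d3, t3, rfl⟩ := pv_shape4 r3 (hrows _ (by simp))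
  show _ = _
  have h4 : PySem.List.pyRange 0 4 1 = [0, 1, 2, 3] := by decide
  have h3 : PySem.List.pyRange 0 3 1 = [0, 1, 2] := by decide
  simp only [calculate_smoothness, calculate_smoothness_alt, pvRowCost, pvPairCost, pvGo,
    h4, h3, List.foldl_cons, List.foldl_nil, List.map]
  simp [pysem]
  ring
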